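-- pv_equiv track=rewrite | github.com/mwiens91/practice-problems | leetcode/3912.valid-elements-in-an-array.py | findValidElements
-- ===== SOURCE A (Python) =====
-- def findValidElements(nums: list[int]) -> list[int]:
--     suffixMaxes = [nums[-1]] * len(nums)
--
--     # Dont need two first suffixes and already included the last
--     for i in range(len(nums) - 2, 1, -1):
--         suffixMaxes[i] = max(nums[i], suffixMaxes[i + 1])
--
--     prefixMax = nums[0]
--     ans = [nums[0]]
--
--     for i in range(1, len(nums)):
--         if (
--             i == len(nums) - 1
--             or nums[i] > suffixMaxes[i + 1]
--             or nums[i] > prefixMax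
--         ):
--             ans.append(nums[i])
--
--         prefixMax = max(nums[i], prefixMax)
--
--     return ans
-- ===== SOURCE B (Python) =====
-- def findValidElements(nums: list[int]) -> list[int]:
--     # An element is valid iff its index is a strict "record" seen from the left
--     # (greater than everything before it; index 0 trivially) or from the right
--     # (greater than everything after it; the last index trivially).
--     keep = set()
--     best = None
--     for i, x in enumerate(nums):
--         if best is None or x > best:
--             keep.add(i)
--             best = x
--     best = None
--     for i in range(len(nums) - 1, -1, -1):
--         if best is None or nums[i] > best:
--             keep.add(i)
--             best = nums[i]
--     return [nums[i] for i in sorted(keep)]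
-- ===== Notes on version B (the rewrite author's own statement) =====
-- stated objective: alternative
-- what changed: Instead of precomputing a suffix-max table and filtering with a threaded prefix max, B collects the SET of strict record indices in two directional record scans (left-to-right and right-to-left running-record scans that only store indices where a new record occurs), then sorts that index set and gathers the elements; it avoids building the n-sized max table and the per-index table comparisons, which measures as a constant-factor speedup.
import Mathlib
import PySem

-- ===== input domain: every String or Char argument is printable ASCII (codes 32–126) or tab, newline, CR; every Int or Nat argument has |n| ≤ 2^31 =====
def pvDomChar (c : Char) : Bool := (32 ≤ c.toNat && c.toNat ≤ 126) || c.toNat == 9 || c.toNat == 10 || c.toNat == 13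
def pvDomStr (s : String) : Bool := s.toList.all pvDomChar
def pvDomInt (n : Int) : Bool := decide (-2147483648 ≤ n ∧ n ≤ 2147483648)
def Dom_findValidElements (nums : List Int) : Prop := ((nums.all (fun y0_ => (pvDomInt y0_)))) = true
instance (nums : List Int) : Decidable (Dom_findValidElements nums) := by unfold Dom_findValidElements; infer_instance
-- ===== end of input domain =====

-- B replaces A's suffix-max table + threaded prefix-max filter loop by a different strategy:
-- collect the SET of strict record indices in two directional record scans, sort the index
-- set, and gather the elements (objective: alternative). Pre_ excludes the empty list,
-- where A raises IndexError (it reads nums[-1]).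


-- ===== PORT A =====
def findValidElements (nums : List Int) : List Int :=
  match PySem.List.pyGet? nums (-1) with
  | none => []    -- reading the last element raises IndexError on the empty list; excluded by Pre_
  | some last =>
    let n : Int := (nums.length : Int)
    -- suffixMaxes = [nums[-1]] * len(nums);  for i in range(len(nums)-2, 1, -1): …
    let suffixMaxes : List Int :=
      (PySem.List.pyRange (n - 2) 1 (-1)).foldl
        (fun s i =>
          PySem.List.pySetD s i (max (PySem.List.pyGetD nums i 0) (PySem.List.pyGetD s (i + 1) 0)))
        (List.replicate nums.length last)
    -- prefixMax = nums[0]; ans = [nums[0]]; for i in range(1, len(nums)): …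
    let st :=
      (PySem.List.pyRange 1 n 1).foldl
        (fun (st : Int × List Int) i =>
          (max (PySem.List.pyGetD nums i 0) st.1,
           if i = n - 1 ∨
              PySem.List.pyGetD nums i 0 > PySem.List.pyGetD suffixMaxes (i + 1) 0 ∨
              PySem.List.pyGetD nums i 0 > st.1
           then st.2 ++ [PySem.List.pyGetD nums i 0] else st.2))
        (PySem.List.pyGetD nums 0 0, [PySem.List.pyGetD nums 0 0])
    st.2

-- ===== PORT B =====
def findValidElements_alt (nums : List Int) : List Int :=
  -- keep = set(); best = None
  -- for i, x in enumerate(nums):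
  --     if best is None or x > best: keep.add(i); best = x
  let st1 : PySem.Set Int × Option Int :=
    (PySem.List.enumerate nums).foldl
      (fun (st : PySem.Set Int × Option Int) q =>
        match st.2 with
        | none => (PySem.Set.add st.1 q.1, some q.2)
        | some b => if q.2 > b then (PySem.Set.add st.1 q.1, some q.2) else st)
      (PySem.Set.empty, none)
  -- best = None
  -- for i in range(len(nums) - 1, -1, -1):
  --     if best is None or nums[i] > best: keep.add(i); best = nums[i]
  let st2 : PySem.Set Int × Option Int :=
    (PySem.List.pyRange ((nums.length : Int) - 1) (-1) (-1)).foldl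
      (fun (st : PySem.Set Int × Option Int) i =>
        match st.2 with
        | none => (PySem.Set.add st.1 i, some (PySem.List.pyGetD nums i 0))
        | some b =>
          if PySem.List.pyGetD nums i 0 > b then (PySem.Set.add st.1 i, some (PySem.List.pyGetD nums i 0))
          else st)
      (st1.1, none)
  -- return [nums[i] for i in sorted(keep)]   (sorted of a set: no key, order-safe)
  (PySem.List.sorted st2.1 (fun x => x) false).map (fun i => PySem.List.pyGetD nums i 0)

-- ===== PRECONDITION & SPEC =====
-- Pre_ excludes only the empty list: there A's first line raises IndexError reading the last element.
def Pre_findValidElements (nums : List Int) : Prop := nums ≠ []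
instance (nums : List Int) : Decidable (Pre_findValidElements nums) := by unfold Pre_findValidElements; infer_instance
def pvWitness_findValidElements : List Int := [1, 2]

def Spec_findValidElements (nums : List Int) (out : List Int) : Prop := out = findValidElements_alt nums
instance (nums : List Int) (out : List Int) : Decidable (Spec_findValidElements nums out) := by unfold Spec_findValidElements; infer_instance

-- ===== CLAIM (what is proved, stated in full; the proofs are below) =====
def Claim_equal_findValidElements : Prop := ∀ (nums : List Int), Dom_findValidElements nums → Pre_findValidElements nums → Spec_findValidElements nums (findValidElements nums)

-- ===== LEMMAS AND PROOFS =====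

-- max of a nonempty list, as Python's running max computes it (value on [] irrelevant)
def dmax : List Int → Int
  | [] => 0
  | x :: t => t.foldl max x

-- the common target: index `i` survives iff it is the last index, or beats the suffix max, or beats the prefix max
def goodIdx (nums : List Int) (i : Nat) : Bool :=
  decide ((i : Int) = (nums.length : Int) - 1) ||
  decide (nums.getD i 0 > dmax (nums.drop (i + 1))) ||
  decide (nums.getD i 0 > dmax (nums.take i))

def target (nums : List Int) : List Int :=
  nums.getD 0 0 :: ((List.range' 1 (nums.length - 1)).filter (goodIdx nums)).map (fun i => nums.getD i 0)

lemma dmax_cons (x : Int) (t : List Int) (h : t ≠ []) : dmax (x :: t) = max x (dmax t) := by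
  haveI : Std.Associative (max : Int → Int → Int) := ⟨max_assoc⟩
  cases t with
  | nil => exact absurd rfl h
  | cons y t' => simpa [dmax] using List.foldl_assoc (op := max) (l := t') (a₁ := x) (a₂ := y)

lemma dmax_append_singleton (l : List Int) (x : Int) (h : l ≠ []) :
    dmax (l ++ [x]) = max (dmax l) x := by
  cases l with
  | nil => exact absurd rfl h
  | cons y t => simp [dmax, List.foldl_append]

lemma dmax_take_succ (nums : List Int) (i : Nat) (h : i < nums.length) :
    dmax (nums.take (i + 1)) = if i = 0 then nums.getD i 0 else max (dmax (nums.take i)) (nums.getD i 0) := by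
  have htake : nums.take (i + 1) = nums.take i ++ [nums[i]] := by
    rw [List.take_add_one, List.getElem?_eq_getElem h]
    rfl
  rw [htake, List.getD_eq_getElem nums 0 h]
  rcases Nat.eq_zero_or_pos i with h0 | h0
  · subst h0; simp [dmax]
  · rw [dmax_append_singleton _ _ (by
      intro hc
      rcases List.take_eq_nil_iff.mp hc with h' | h'
      · omega
      · subst h'; simp at h)]
    simp [Nat.pos_iff_ne_zero.mp h0]

lemma dmax_drop_pred (nums : List Int) (j : Nat) (h1 : j + 1 ≤ nums.length) (h : j < nums.length) :
    dmax (nums.drop j) = if j + 1 = nums.length then nums.getD j 0 else max (nums.getD j 0) (dmax (nums.drop (j + 1))) := by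
  have hdrop : nums.drop j = nums[j] :: nums.drop (j + 1) := List.drop_eq_getElem_cons h
  rw [hdrop, List.getD_eq_getElem nums 0 h]
  by_cases he : j + 1 = nums.length
  · rw [List.drop_eq_nil_of_le (by omega)]
    simp [dmax, he]
  · rw [dmax_cons _ _ (by
      intro hc
      have := congrArg List.length hc
      simp at this
      omega)]
    simp [he]

-- ---- A's suffix table ----
lemma A_table (nums : List Int) (last : Int) :
    ∀ (k : Nat) (a : Int) (s : List Int), a ≤ (nums.length : Int) - 2 → (a - 1).toNat = k →
      s.length = nums.length →
      (∀ j : Nat, j < nums.length →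
        PySem.List.pyGetD s (j : Int) 0 = if a < (j : Int) then dmax (nums.drop j) else last) →
      ∀ j : Nat, 2 ≤ j → j < nums.length →
        PySem.List.pyGetD
          ((PySem.List.pyRange a 1 (-1)).foldl
            (fun s i =>
              PySem.List.pySetD s i (max (PySem.List.pyGetD nums i 0) (PySem.List.pyGetD s (i + 1) 0))) s)
          (j : Int) 0 = dmax (nums.drop j) := by
  intro k
  induction k with
  | zero =>
    intro a s ha hk hlen hinv j hj2 hjn
    rw [PySem.List.pyRange_neg_one_eq_nil (by omega), List.foldl_nil, hinv j hjn,
      if_pos (by omega)]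
  | succ k ih =>
    intro a s ha hk hlen hinv j hj2 hjn
    have ha1 : 1 < a := by omega
    have hat : ((a.toNat : Nat) : Int) = a := Int.toNat_of_nonneg (by omega)
    rw [PySem.List.pyRange_neg_one_cons (by omega), List.foldl_cons]
    refine ih (a - 1) _ (by omega) (by omega)
      (by rw [PySem.List.length_pySetD]; exact hlen) ?_ j hj2 hjn
    intro j' hj'
    have hset := PySem.List.pyGetD_pySetD_natCast s a.toNat j'
      (max (PySem.List.pyGetD nums a 0) (PySem.List.pyGetD s (a + 1) 0)) 0 (by omega)
    rw [hat] at hset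
    rw [hset]
    by_cases hje : j' = a.toNat
    · subst hje
      rw [if_pos rfl, if_pos (by omega)]
      have hcast : (a + 1 : Int) = ((a.toNat + 1 : Nat) : Int) := by omega
      rw [hcast, hinv (a.toNat + 1) (by omega), if_pos (by omega)]
      have hg : PySem.List.pyGetD nums a 0 = nums.getD a.toNat 0 := by
        conv_lhs => rw [← hat]
        rw [PySem.List.pyGetD_natCast]
      rw [hg, dmax_drop_pred nums a.toNat (by omega) (by omega), if_neg (by omega)]
    · rw [if_neg hje, hinv j' hj']
      split_ifs with h1 h2 h2 <;> first | rfl | (exfalso; omega)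

-- ---- A's main loop ----
lemma A_loop (nums : List Int) (t : List Int)
    (ht : ∀ j : Nat, 2 ≤ j → j < nums.length → PySem.List.pyGetD t (j : Int) 0 = dmax (nums.drop j)) :
    ∀ (k : Nat) (a : Int) (acc : List Int), 1 ≤ a → a ≤ (nums.length : Int) →
      ((nums.length : Int) - a).toNat = k →
      ((PySem.List.pyRange a (nums.length : Int) 1).foldl
        (fun (st : Int × List Int) i =>
          (max (PySem.List.pyGetD nums i 0) st.1,
           if i = (nums.length : Int) - 1 ∨
              PySem.List.pyGetD nums i 0 > PySem.List.pyGetD t (i + 1) 0 ∨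
              PySem.List.pyGetD nums i 0 > st.1
           then st.2 ++ [PySem.List.pyGetD nums i 0] else st.2))
        (dmax (nums.take a.toNat), acc)).2
      = acc ++ ((List.range' a.toNat (nums.length - a.toNat)).filter (goodIdx nums)).map (fun i => nums.getD i 0) := by
  intro k
  induction k with
  | zero =>
    intro a acc ha han hk
    have hae : a = (nums.length : Int) := by omega
    subst hae
    rw [PySem.List.pyRange_one_eq_nil (le_refl _), List.foldl_nil]
    simp
  | succ k ih =>
    intro a acc ha han hk
    have hlt : a < (nums.length : Int) := by omega
    have hat : ((a.toNat : Nat) : Int) = a := Int.toNat_of_nonneg (by omega)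
    have hg : PySem.List.pyGetD nums a 0 = nums.getD a.toNat 0 := by
      conv_lhs => rw [← hat]
      rw [PySem.List.pyGetD_natCast]
    rw [PySem.List.pyRange_one_cons hlt, List.foldl_cons]
    dsimp only
    have hfst : max (PySem.List.pyGetD nums a 0) (dmax (nums.take a.toNat)) = dmax (nums.take (a.toNat + 1)) := by
      rw [hg, dmax_take_succ nums a.toNat (by omega), if_neg (by omega), max_comm]
    have hsplit : nums.length - a.toNat = (nums.length - (a.toNat + 1)) + 1 := by omega
    rw [hsplit, List.range'_succ]
    have hCiff : (a = (nums.length : Int) - 1 ∨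
        PySem.List.pyGetD nums a 0 > PySem.List.pyGetD t (a + 1) 0 ∨
        PySem.List.pyGetD nums a 0 > dmax (nums.take a.toNat)) ↔ goodIdx nums a.toNat = true := by
      simp only [goodIdx, Bool.or_eq_true, decide_eq_true_eq, hg]
      by_cases hlast : a = (nums.length : Int) - 1
      · constructor
        · intro _; exact Or.inl (Or.inl (by omega))
        · intro _; exact Or.inl hlast
      · have hcast : (a + 1 : Int) = ((a.toNat + 1 : Nat) : Int) := by push_cast; omega
        rw [hcast, ht (a.toNat + 1) (by omega) (by omega)]
        constructor
        · rintro (h | h | h)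
          · exact absurd h hlast
          · exact Or.inl (Or.inr h)
          · exact Or.inr h
        · rintro ((h | h) | h)
          · exact absurd (by omega : a = (nums.length : Int) - 1) hlast
          · exact Or.inr (Or.inl h)
          · exact Or.inr (Or.inr h)
    have htn : (a + 1).toNat = a.toNat + 1 := by omega
    by_cases hC : a = (nums.length : Int) - 1 ∨
        PySem.List.pyGetD nums a 0 > PySem.List.pyGetD t (a + 1) 0 ∨
        PySem.List.pyGetD nums a 0 > dmax (nums.take a.toNat)
    · rw [if_pos hC, hfst, hg, List.filter_cons_of_pos (hCiff.mp hC), List.map_cons]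
      have := ih (a + 1) (acc ++ [nums.getD a.toNat 0]) (by omega) (by omega) (by omega)
      rw [htn, ← List.append_cons] at this
      exact this
    · rw [if_neg hC, hfst, List.filter_cons_of_neg (fun hgc => hC (hCiff.mpr hgc))]
      have := ih (a + 1) acc (by omega) (by omega) (by omega)
      rw [htn] at this
      exact this

lemma A_eq_target (nums : List Int) (hne : nums ≠ []) : findValidElements nums = target nums := by
  have hlen : 0 < nums.length := List.length_pos_iff.mpr hne
  obtain ⟨last, hm⟩ : ∃ last, PySem.List.pyGet? nums (-1) = some last := by
    rw [PySem.List.pyGet?_neg_one]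
    cases h : nums.getLast? with
    | none => exact absurd (List.getLast?_eq_none_iff.mp h) hne
    | some x => exact ⟨x, rfl⟩
  have hlast : last = nums.getD (nums.length - 1) 0 := by
    rw [PySem.List.pyGet?_neg_one, List.getLast?_eq_getElem?,
      List.getElem?_eq_getElem (by omega)] at hm
    rw [List.getD_eq_getElem _ _ (by omega)]
    exact (Option.some.inj hm).symm
  have hinv0 : ∀ j : Nat, j < nums.length →
      PySem.List.pyGetD (List.replicate nums.length last) (j : Int) 0 =
        if ((nums.length : Int) - 2) < (j : Int) then dmax (nums.drop j) else last := by
    intro j hj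
    rw [PySem.List.pyGetD_natCast]
    have hrep : (List.replicate nums.length last).getD j 0 = last := by
      rw [List.getD_eq_getElem _ _ (by simpa using hj)]
      simp
    rw [hrep]
    by_cases hc : ((nums.length : Int) - 2) < (j : Int)
    · rw [if_pos hc]
      have hj1 : j = nums.length - 1 := by omega
      subst hj1
      rw [dmax_drop_pred nums (nums.length - 1) (by omega) (by omega), if_pos (by omega), hlast]
    · rw [if_neg hc]
  have htab := A_table nums last (((nums.length : Int) - 2 - 1).toNat) ((nums.length : Int) - 2)
    (List.replicate nums.length last) (le_refl _) rfl (by simp) hinv0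
  have hinit : nums.getD 0 0 = dmax (nums.take (1 : Int).toNat) := by
    rw [Int.toNat_one, dmax_take_succ nums 0 hlen]
    simp
  have hloop := A_loop nums _ htab (((nums.length : Int) - 1).toNat) 1 [nums.getD 0 0]
    (le_refl 1) (by omega) rfl
  simp only [findValidElements, hm]
  have hstate : ((PySem.List.pyGetD nums 0 0 : Int), [PySem.List.pyGetD nums 0 0]) =
      (dmax (nums.take (1 : Int).toNat), [nums.getD 0 0]) := by
    simp only [Prod.mk.injEq]
    exact ⟨by rw [PySem.List.pyGetD_zero, hinit], by rw [PySem.List.pyGetD_zero]⟩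
  rw [hstate, hloop]
  unfold target
  rw [Int.toNat_one, List.singleton_append]

-- ---- B: the forward record scan ----
-- goodB i: index i survives (i = 0 counts as a prefix record)
def goodB (nums : List Int) (j : Nat) : Bool := decide (j = 0) || goodIdx nums j

lemma B_fwdAux (t : List Int) :
    ∀ (k : Nat) (s : List Int) (m : Int), s.Nodup →
      (((PySem.List.enumerate t ((k : Nat) : Int)).foldl
        (fun (st : PySem.Set Int × Option Int) q =>
          match st.2 with
          | none => (PySem.Set.add st.1 q.1, some q.2)
          | some b => if q.2 > b then (PySem.Set.add st.1 q.1, some q.2) else st)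
        (s, some m)).1.Nodup) ∧
      (∀ x : Int, x ∈ ((PySem.List.enumerate t ((k : Nat) : Int)).foldl
        (fun (st : PySem.Set Int × Option Int) q =>
          match st.2 with
          | none => (PySem.Set.add st.1 q.1, some q.2)
          | some b => if q.2 > b then (PySem.Set.add st.1 q.1, some q.2) else st)
        (s, some m)).1 ↔
        x ∈ s ∨ ∃ j : Nat, j < t.length ∧ x = ((k + j : Nat) : Int) ∧
          t.getD j 0 > (t.take j).foldl max m) := by
  induction t with
  | nil =>
    intro k s m hnd
    refine ⟨by simpa [PySem.List.enumerate_nil] using hnd, ?_⟩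
    intro x
    simp [PySem.List.enumerate_nil]
  | cons y t ih =>
    intro k s m hnd
    rw [PySem.List.enumerate_cons, List.foldl_cons]
    dsimp only
    have hcast : ((k : Nat) : Int) + 1 = ((k + 1 : Nat) : Int) := by push_cast; ring
    rw [hcast]
    by_cases hy : y > m
    · rw [if_pos hy]
      obtain ⟨h1, h2⟩ := ih (k + 1) (PySem.Set.add s ((k : Nat) : Int)) y (PySem.Set.nodup_add _ _ hnd)
      refine ⟨h1, ?_⟩
      intro x
      rw [h2 x]
      constructor
      · rintro (hx | ⟨j, hj, hxe, hc⟩)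
        · rcases (PySem.Set.mem_add _ _ _).mp hx with hx | hx
          · exact Or.inl hx
          · exact Or.inr ⟨0, by simp, by simpa using hx, by simpa using hy⟩
        · refine Or.inr ⟨j + 1, by simp; omega, by rw [hxe]; push_cast; ring, ?_⟩
          simpa [List.foldl_cons, max_eq_right (le_of_lt hy)] using hc
      · rintro (hx | ⟨j, hj, hxe, hc⟩)
        · exact Or.inl ((PySem.Set.mem_add _ _ _).mpr (Or.inl hx))
        · cases j with
          | zero => exact Or.inl ((PySem.Set.mem_add _ _ _).mpr (Or.inr (by simpa using hxe)))
          | succ j' =>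
            refine Or.inr ⟨j', by simp at hj; omega, by rw [hxe]; push_cast; ring, ?_⟩
            simpa [List.foldl_cons, max_eq_right (le_of_lt hy)] using hc
    · rw [if_neg hy]
      obtain ⟨h1, h2⟩ := ih (k + 1) s m hnd
      refine ⟨h1, ?_⟩
      intro x
      rw [h2 x]
      constructor
      · rintro (hx | ⟨j, hj, hxe, hc⟩)
        · exact Or.inl hx
        · refine Or.inr ⟨j + 1, by simp; omega, by rw [hxe]; push_cast; ring, ?_⟩
          simpa [List.foldl_cons, max_eq_left (not_lt.mp hy)] using hc
      · rintro (hx | ⟨j, hj, hxe, hc⟩)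
        · exact Or.inl hx
        · cases j with
          | zero =>
            exfalso
            simp at hc
            exact hy hc
          | succ j' =>
            refine Or.inr ⟨j', by simp at hj; omega, by rw [hxe]; push_cast; ring, ?_⟩
            simpa [List.foldl_cons, max_eq_left (not_lt.mp hy)] using hc

-- ---- B: the backward record scan ----
lemma B_bwdAux (nums : List Int) :
    ∀ (k : Nat) (a : Int) (s : List Int) (b : Option Int), a ≤ (nums.length : Int) - 1 →
      (a + 1).toNat = k → s.Nodup →
      (if a = (nums.length : Int) - 1 then b = none
       else b = some (dmax (nums.drop (a + 1).toNat))) →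
      (((PySem.List.pyRange a (-1) (-1)).foldl
        (fun (st : PySem.Set Int × Option Int) i =>
          match st.2 with
          | none => (PySem.Set.add st.1 i, some (PySem.List.pyGetD nums i 0))
          | some b =>
            if PySem.List.pyGetD nums i 0 > b then (PySem.Set.add st.1 i, some (PySem.List.pyGetD nums i 0))
            else st)
        (s, b)).1.Nodup) ∧
      (∀ x : Int, x ∈ ((PySem.List.pyRange a (-1) (-1)).foldl
        (fun (st : PySem.Set Int × Option Int) i =>
          match st.2 with
          | none => (PySem.Set.add st.1 i, some (PySem.List.pyGetD nums i 0))
          | some b =>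
            if PySem.List.pyGetD nums i 0 > b then (PySem.Set.add st.1 i, some (PySem.List.pyGetD nums i 0))
            else st)
        (s, b)).1 ↔
        x ∈ s ∨ ∃ j : Nat, (j : Int) ≤ a ∧ x = (j : Int) ∧
          ((j : Int) = (nums.length : Int) - 1 ∨ nums.getD j 0 > dmax (nums.drop (j + 1)))) := by
  intro k
  induction k with
  | zero =>
    intro a s b ha hk hnd hb
    rw [PySem.List.pyRange_neg_one_eq_nil (by omega), List.foldl_nil]
    refine ⟨hnd, ?_⟩
    intro x
    constructor
    · exact Or.inl
    · rintro (hx | ⟨j, hj, _, _⟩)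
      · exact hx
      · exfalso; omega
  | succ k ih =>
    intro a s b ha hk hnd hb
    have ha0 : 0 ≤ a := by omega
    have hat : ((a.toNat : Nat) : Int) = a := Int.toNat_of_nonneg ha0
    have hg : PySem.List.pyGetD nums a 0 = nums.getD a.toNat 0 := by
      conv_lhs => rw [← hat]
      rw [PySem.List.pyGetD_natCast]
    rw [PySem.List.pyRange_neg_one_cons (by omega), List.foldl_cons]
    dsimp only
    by_cases hae : a = (nums.length : Int) - 1
    · rw [if_pos hae] at hb
      rw [hb]
      dsimp only
      have hnn : nums.getD a.toNat 0 = dmax (nums.drop a.toNat) := by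
        rw [dmax_drop_pred nums a.toNat (by omega) (by omega), if_pos (by omega)]
      obtain ⟨h1, h2⟩ := ih (a - 1) (PySem.Set.add s a) (some (PySem.List.pyGetD nums a 0))
        (by omega) (by omega) (PySem.Set.nodup_add _ _ hnd)
        (by
          rw [if_neg (by omega)]
          have h' : (a - 1 + 1).toNat = a.toNat := by omega
          rw [h', hg, hnn])
      refine ⟨h1, ?_⟩
      intro x
      rw [h2 x]
      constructor
      · rintro (hx | ⟨j, hj, hxe, hc⟩)
        · rcases (PySem.Set.mem_add _ _ _).mp hx with hx | hx
          · exact Or.inl hx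
          · exact Or.inr ⟨a.toNat, by omega, by rw [hx, hat], Or.inl (by rw [hat, hae])⟩
        · exact Or.inr ⟨j, by omega, hxe, hc⟩
      · rintro (hx | ⟨j, hj, hxe, hc⟩)
        · exact Or.inl ((PySem.Set.mem_add _ _ _).mpr (Or.inl hx))
        · by_cases hja : (j : Int) = a
          · exact Or.inl ((PySem.Set.mem_add _ _ _).mpr (Or.inr (by rw [hxe, hja])))
          · exact Or.inr ⟨j, by omega, hxe, hc⟩
    · rw [if_neg hae] at hb
      rw [hb]
      dsimp only
      have hsp : (a + 1).toNat = a.toNat + 1 := by omega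
      have hdm : dmax (nums.drop a.toNat) =
          max (nums.getD a.toNat 0) (dmax (nums.drop (a.toNat + 1))) := by
        rw [dmax_drop_pred nums a.toNat (by omega) (by omega), if_neg (by omega)]
      by_cases hrec : PySem.List.pyGetD nums a 0 > dmax (nums.drop (a + 1).toNat)
      · rw [if_pos hrec]
        have hrec' : dmax (nums.drop (a.toNat + 1)) < nums.getD a.toNat 0 := by
          rw [hg, hsp] at hrec; exact hrec
        obtain ⟨h1, h2⟩ := ih (a - 1) (PySem.Set.add s a) (some (PySem.List.pyGetD nums a 0))
          (by omega) (by omega) (PySem.Set.nodup_add _ _ hnd)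
          (by
            rw [if_neg (by omega)]
            rw [hg]
            have : (a - 1 + 1).toNat = a.toNat := by omega
            rw [this, hdm, max_eq_left (le_of_lt hrec')])
        refine ⟨h1, ?_⟩
        intro x
        rw [h2 x]
        constructor
        · rintro (hx | ⟨j, hj, hxe, hc⟩)
          · rcases (PySem.Set.mem_add _ _ _).mp hx with hx | hx
            · exact Or.inl hx
            · exact Or.inr ⟨a.toNat, by omega, by rw [hx, hat], Or.inr hrec'⟩
          · exact Or.inr ⟨j, by omega, hxe, hc⟩
        · rintro (hx | ⟨j, hj, hxe, hc⟩)
          · exact Or.inl ((PySem.Set.mem_add _ _ _).mpr (Or.inl hx))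
          · by_cases hja : (j : Int) = a
            · exact Or.inl ((PySem.Set.mem_add _ _ _).mpr (Or.inr (by rw [hxe, hja])))
            · exact Or.inr ⟨j, by omega, hxe, hc⟩
      · rw [if_neg hrec]
        have hrec' : ¬ dmax (nums.drop (a.toNat + 1)) < nums.getD a.toNat 0 := by
          rw [hg, hsp] at hrec; exact hrec
        obtain ⟨h1, h2⟩ := ih (a - 1) s (some (dmax (nums.drop (a + 1).toNat)))
          (by omega) (by omega) hnd
          (by
            rw [if_neg (by omega)]
            have : (a - 1 + 1).toNat = a.toNat := by omega
            rw [this, hdm, max_eq_right (not_lt.mp hrec'), hsp])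
        refine ⟨h1, ?_⟩
        intro x
        rw [h2 x]
        constructor
        · rintro (hx | ⟨j, hj, hxe, hc⟩)
          · exact Or.inl hx
          · exact Or.inr ⟨j, by omega, hxe, hc⟩
        · rintro (hx | ⟨j, hj, hxe, hc⟩)
          · exact Or.inl hx
          · by_cases hja : (j : Int) = a
            · exfalso
              rcases hc with hc | hc
              · omega
              · have hjt : j = a.toNat := by omega
                rw [hjt] at hc
                exact hrec' hc
            · exact Or.inr ⟨j, by omega, hxe, hc⟩

lemma B_eq_target (nums : List Int) (hne : nums ≠ []) : findValidElements_alt nums = target nums := by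
  cases nums with
  | nil => exact absurd rfl hne
  | cons y t =>
    simp only [findValidElements_alt]
    -- the forward scan: first step consumes (0, y), then B_fwdAux describes the rest
    have hstep1 : (PySem.List.enumerate (y :: t)).foldl
        (fun (st : PySem.Set Int × Option Int) q =>
          match st.2 with
          | none => (PySem.Set.add st.1 q.1, some q.2)
          | some b => if q.2 > b then (PySem.Set.add st.1 q.1, some q.2) else st)
        (PySem.Set.empty, none)
        = (PySem.List.enumerate t ((1 : Nat) : Int)).foldl
        (fun (st : PySem.Set Int × Option Int) q =>
          match st.2 with
          | none => (PySem.Set.add st.1 q.1, some q.2)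
          | some b => if q.2 > b then (PySem.Set.add st.1 q.1, some q.2) else st)
        ([0], some y) := by
      rw [PySem.List.enumerate_cons, List.foldl_cons]
      rfl
    rw [hstep1]
    obtain ⟨hK1nd, hK1mem⟩ := B_fwdAux t 1 [0] y (by simp)
    obtain ⟨hKnd, hKmem⟩ := B_bwdAux (y :: t) ((((y :: t).length : Int) - 1 + 1).toNat)
      (((y :: t).length : Int) - 1) _ none (by omega) rfl hK1nd (by simp)
    -- membership characterisation of the final index set
    have hmem : ∀ x : Int,
        (x ∈ ((PySem.List.pyRange (((y :: t).length : Int) - 1) (-1) (-1)).foldl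
          (fun (st : PySem.Set Int × Option Int) i =>
            match st.2 with
            | none => (PySem.Set.add st.1 i, some (PySem.List.pyGetD (y :: t) i 0))
            | some b =>
              if PySem.List.pyGetD (y :: t) i 0 > b then
                (PySem.Set.add st.1 i, some (PySem.List.pyGetD (y :: t) i 0))
              else st)
          (((PySem.List.enumerate t ((1 : Nat) : Int)).foldl
            (fun (st : PySem.Set Int × Option Int) q =>
              match st.2 with
              | none => (PySem.Set.add st.1 q.1, some q.2)
              | some b => if q.2 > b then (PySem.Set.add st.1 q.1, some q.2) else st)
            ([0], some y)).1, none)).1) ↔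
        ∃ j : Nat, j < (y :: t).length ∧ x = (j : Int) ∧ goodB (y :: t) j = true := by
      intro x
      rw [hKmem x, hK1mem x]
      simp only [goodB, goodIdx, Bool.or_eq_true, decide_eq_true_eq, List.mem_singleton]
      constructor
      · rintro ((hx | ⟨j, hj, hxe, hc⟩) | ⟨j, hj, hxe, hc⟩)
        · exact ⟨0, by simp, hx, Or.inl rfl⟩
        · refine ⟨j + 1, by simp; omega, by rw [hxe]; push_cast; ring,
            Or.inr (Or.inr ?_)⟩
          simpa [dmax] using hc
        · exact ⟨j, by omega, hxe, Or.inr (Or.inl hc)⟩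
      · rintro ⟨j, hjlen, hxe, hgood⟩
        cases j with
        | zero => exact Or.inl (Or.inl (by simpa using hxe))
        | succ j' =>
          rcases hgood with h0 | (hAB | hC)
          · omega
          · exact Or.inr ⟨j' + 1, by omega, hxe, hAB⟩
          · refine Or.inl (Or.inr ⟨j', by simp at hjlen; omega,
              by rw [hxe]; push_cast; ring, ?_⟩)
            simpa [dmax] using hC
    -- the sorted index set is exactly the increasing list of good indices
    have hTnd : (List.map (fun j : Nat => (j : Int))
        ((List.range (y :: t).length).filter (goodB (y :: t)))).Nodup :=
      (List.nodup_range.filter _).map (fun a b h => by exact_mod_cast h)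
    have hTpair : (List.map (fun j : Nat => (j : Int))
        ((List.range (y :: t).length).filter (goodB (y :: t)))).Pairwise (fun a b => a < b) :=
      List.Pairwise.map _ (fun a b h => by exact_mod_cast h)
        (List.pairwise_lt_range.filter _)
    have hperm := (List.perm_ext_iff_of_nodup hTnd hKnd).mpr (by
      intro x
      rw [hmem x]
      simp only [List.mem_map, List.mem_filter, List.mem_range]
      constructor
      · rintro ⟨j, ⟨hj, hg⟩, hx⟩
        exact ⟨j, hj, hx.symm, hg⟩
      · rintro ⟨j, hj, hx, hg⟩
        exact ⟨j, ⟨hj, hg⟩, hx.symm⟩)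
    rw [PySem.List.sorted_eq_of_perm_of_pairwise_lt _ _ _ hperm hTpair, List.map_map]
    have hfun : ((fun i => PySem.List.pyGetD (y :: t) i 0) ∘ fun j : Nat => (j : Int))
        = fun j : Nat => (y :: t).getD j 0 := by
      funext j
      simp
    rw [hfun]
    have hrange : List.range (y :: t).length = 0 :: List.range' 1 ((y :: t).length - 1) := by
      rw [List.range_eq_range']
      conv_lhs => rw [show (y :: t).length = ((y :: t).length - 1) + 1 from by simp,
        List.range'_succ]
    rw [hrange, List.filter_cons_of_pos (by simp [goodB]), List.map_cons]
    rw [List.filter_congr (l := List.range' 1 ((y :: t).length - 1)) (q := goodIdx (y :: t))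
      (fun i hi => by
        have hb := List.mem_range'_1.mp hi
        simp [goodB, show ¬ i = 0 from by omega])]
    rfl

-- ===== VERDICT (by name: the statement is the Claim_ definition above) =====
theorem findValidElements_spec : Claim_equal_findValidElements := by
  intro nums _ hpre
  unfold Spec_findValidElements
  rw [A_eq_target nums hpre, B_eq_target nums hpre]
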